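-- pv_equiv track=rewrite | github.com/QuantedgeRA/treasury-signals | purchase_reconciler.py | _normalize_ticker_for_dedup
-- ===== SOURCE A (Python) =====
-- def _normalize_ticker_for_dedup(ticker):
--     """Normalize ticker for deduplication matching."""
--     if not ticker:
--         return ""
--     t = ticker.upper().strip()
--     # Strip common exchange suffixes
--     for suffix in [".US", ".L", ".TO", ".AX", ".DE", ".PA", ".SW", ".HK", ".KS", ".SS", ".SZ", ".SA", ".V", ".ST", ".CO", ".MI", ".BR", ".MC", ".OL", ".HE", ".IS"]:
--         if t.endswith(suffix):
--             t = t[:-len(suffix)]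
--             break
--     return t
-- ===== SOURCE B (Python) =====
-- _SUFFIXES = {".US", ".L", ".TO", ".AX", ".DE", ".PA", ".SW", ".HK", ".KS", ".SS", ".SZ", ".SA", ".V", ".ST", ".CO", ".MI", ".BR", ".MC", ".OL", ".HE", ".IS"}
--
--
-- def _normalize_ticker_for_dedup(ticker):
--     """Normalize ticker for deduplication matching."""
--     if not ticker:
--         return ""
--     t = ticker.upper().strip()
--     idx = t.rfind(".")
--     if idx != -1 and t[idx:] in _SUFFIXES:
--         t = t[:idx]
--     return t
-- ===== Notes on version B (the rewrite author's own statement) =====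
-- stated objective: idiomatic
-- what changed: Instead of scanning all 21 suffixes with endswith, B locates the last dot with rfind and does one set lookup of the trailing segment to decide whether to cut there.
import Mathlib
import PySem

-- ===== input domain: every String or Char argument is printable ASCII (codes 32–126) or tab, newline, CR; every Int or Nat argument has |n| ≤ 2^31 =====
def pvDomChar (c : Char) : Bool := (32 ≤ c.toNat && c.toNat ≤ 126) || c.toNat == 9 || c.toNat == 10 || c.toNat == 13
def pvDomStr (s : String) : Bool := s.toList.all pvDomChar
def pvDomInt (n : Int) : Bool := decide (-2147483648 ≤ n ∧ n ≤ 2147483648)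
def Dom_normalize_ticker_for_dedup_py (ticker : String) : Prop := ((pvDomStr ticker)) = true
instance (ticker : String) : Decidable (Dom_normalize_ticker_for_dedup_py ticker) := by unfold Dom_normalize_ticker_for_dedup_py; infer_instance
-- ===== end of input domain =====

-- B replaces A's scan over all 21 exchange suffixes by one rfind of the last dot plus a
-- single set lookup of the trailing segment (idiomatic; same result, no speed claim).

-- ===== PORT A =====
def pvSuffixListA : List (List Char) :=
  [".US".toList, ".L".toList, ".TO".toList, ".AX".toList, ".DE".toList, ".PA".toList,
   ".SW".toList, ".HK".toList, ".KS".toList, ".SS".toList, ".SZ".toList, ".SA".toList,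
   ".V".toList, ".ST".toList, ".CO".toList, ".MI".toList, ".BR".toList, ".MC".toList,
   ".OL".toList, ".HE".toList, ".IS".toList]

-- the 'for suffix in […]: if t.endswith(suffix): t = t[:-len(suffix)]; break'
def pvStripLoop (suffixes : List (List Char)) (t : List Char) : List Char :=
  match suffixes with
  | [] => t
  | s :: rest =>
      if PySem.Chars.endswith t s then PySem.Chars.slice t none (some (-(s.length : Int)))
      else pvStripLoop rest t

def normalize_ticker_for_dedup_py (ticker : String) : String :=
  if ticker = "" then ""
  else
    let t := PySem.Chars.strip (PySem.Chars.upper ticker.toList)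
    String.mk (pvStripLoop pvSuffixListA t)

-- ===== PORT B =====
def pvSuffixSetB : PySem.Set (List Char) :=
  PySem.Set.ofList ([".US", ".L", ".TO", ".AX", ".DE", ".PA", ".SW", ".HK", ".KS", ".SS",
                     ".SZ", ".SA", ".V", ".ST", ".CO", ".MI", ".BR", ".MC", ".OL", ".HE",
                     ".IS"].map String.toList)

def normalize_ticker_for_dedup_py_alt (ticker : String) : String :=
  if ticker = "" then ""
  else
    let t := PySem.Chars.strip (PySem.Chars.upper ticker.toList)
    let idx := PySem.Chars.rfind t ['.']
    if idx != -1 && PySem.Set.contains pvSuffixSetB (PySem.Chars.slice t (some idx) none) then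
      String.mk (PySem.Chars.slice t none (some idx))
    else
      String.mk t

-- ===== PRECONDITION & SPEC =====
def Spec_normalize_ticker_for_dedup_py (ticker : String) (out : String) : Prop := out = normalize_ticker_for_dedup_py_alt ticker
instance (ticker : String) (out : String) : Decidable (Spec_normalize_ticker_for_dedup_py ticker out) := by unfold Spec_normalize_ticker_for_dedup_py; infer_instance

-- ===== CLAIM (what is proved, stated in full; the proofs are below) =====
def Claim_equal_normalize_ticker_for_dedup_py : Prop := ∀ (ticker : String), Dom_normalize_ticker_for_dedup_py ticker → Spec_normalize_ticker_for_dedup_py ticker (normalize_ticker_for_dedup_py ticker)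

-- ===== LEMMAS AND PROOFS =====

-- [c] is a prefix of t.drop i exactly when t[i]? = some c
lemma pvSinglePrefix_iff (c : Char) (t : List Char) (i : Nat) :
    [c].isPrefixOf (t.drop i) = true ↔ t[i]? = some c := by
  rw [List.isPrefixOf_iff_prefix]
  have h0 : (t.drop i)[0]? = t[i]? := by simp [List.getElem?_drop]
  constructor
  · rintro ⟨r, hr⟩
    rw [← h0, ← hr]; rfl
  · intro hc
    rw [← h0] at hc
    cases hd : t.drop i with
    | nil => rw [hd] at hc; simp at hc
    | cons a as =>
        rw [hd] at hc
        simp only [List.getElem?_cons_zero] at hc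
        injection hc with hc
        subst hc
        exact ⟨as, rfl⟩

lemma pvRfindGo_ge (t sub : List Char) : ∀ k, -1 ≤ PySem.Chars.rfind.go t sub k := by
  intro k
  induction k with
  | zero => rw [PySem.Chars.rfind.go.eq_def]; split <;> omega
  | succ j ih =>
      rw [PySem.Chars.rfind.go.eq_def]
      simp only
      split
      · omega
      · exact ih

lemma pvRfindGo_eq (t : List Char) (c : Char) (j : Nat)
    (hj : t[j]? = some c) (hnone : ∀ i, j < i → t[i]? ≠ some c) :
    ∀ k, j ≤ k → PySem.Chars.rfind.go t [c] k = (j : Int) := by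
  intro k
  induction k with
  | zero =>
      intro hjk
      have hj0 : j = 0 := by omega
      subst hj0
      rw [PySem.Chars.rfind.go.eq_def]
      have : [c].isPrefixOf (t.drop 0) = true := (pvSinglePrefix_iff c t 0).mpr hj
      simp only [List.drop_zero] at this
      simp [this]
  | succ k ih =>
      intro hjk
      rw [PySem.Chars.rfind.go.eq_def]
      by_cases hcase : j = k + 1
      · subst hcase
        have : [c].isPrefixOf (t.drop (k + 1)) = true := (pvSinglePrefix_iff c t (k + 1)).mpr hj
        simp [this]
      · have hle : j ≤ k := by omega
        have hfalse : [c].isPrefixOf (t.drop (k + 1)) = false := by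
          by_contra hne
          have htrue : [c].isPrefixOf (t.drop (k + 1)) = true := by
            cases h : [c].isPrefixOf (t.drop (k + 1)) <;> simp_all
          exact hnone (k + 1) (by omega) ((pvSinglePrefix_iff c t (k + 1)).mp htrue)
        simp only [hfalse]
        simp [ih hle]

lemma pvLoop_no_match (L : List (List Char)) (t : List Char)
    (h : ∀ s ∈ L, PySem.Chars.endswith t s = false) : pvStripLoop L t = t := by
  induction L with
  | nil => rfl
  | cons a rest ih =>
      have ha := h a (List.mem_cons_self ..)
      simp only [pvStripLoop, ha]
      simp only [Bool.false_eq_true, if_false]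
      exact ih (fun s hs => h s (List.mem_cons_of_mem _ hs))

lemma pvLoop_match (L : List (List Char)) (t : List Char) (s : List Char)
    (hmem : s ∈ L) (hmatch : PySem.Chars.endswith t s = true)
    (huniq : ∀ s' ∈ L, PySem.Chars.endswith t s' = true → s' = s) :
    pvStripLoop L t = PySem.Chars.slice t none (some (-(s.length : Int))) := by
  induction L with
  | nil => cases hmem
  | cons a rest ih =>
      by_cases ha : PySem.Chars.endswith t a = true
      · have : a = s := huniq a (List.mem_cons_self ..) ha
        subst this
        simp [pvStripLoop, ha]
      · have ha' : PySem.Chars.endswith t a = false := by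
          cases h : PySem.Chars.endswith t a <;> simp_all
        simp only [pvStripLoop, ha', Bool.false_eq_true, if_false]
        have hmem' : s ∈ rest := by
          cases List.mem_cons.mp hmem with
          | inl h => exact absurd (h ▸ hmatch) ha
          | inr h => exact h
        exact ih hmem' (fun s' hs' => huniq s' (List.mem_cons_of_mem _ hs'))

-- no suffix in the list is a proper suffix of another
lemma pvSuffixUniq : ∀ s₁ ∈ pvSuffixListA, ∀ s₂ ∈ pvSuffixListA, s₁ <:+ s₂ → s₁ = s₂ := by
  decide

-- every suffix starts with '.' and has no further '.'
lemma pvSuffixShape : ∀ s ∈ pvSuffixListA, s.head? = some '.' ∧ '.' ∉ s.tail := by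
  decide

lemma pvSetB_mem (x : List Char) :
    PySem.Set.contains pvSuffixSetB x = true ↔ x ∈ pvSuffixListA := by
  have h : pvSuffixSetB = pvSuffixListA := by decide
  rw [h, PySem.Set.contains, List.contains_iff_mem]

-- core: A's suffix loop equals B's rfind-and-lookup on any normalized t
lemma pvCore (t : List Char) :
    String.mk (pvStripLoop pvSuffixListA t) =
      (if (PySem.Chars.rfind t ['.'] != -1
            && PySem.Set.contains pvSuffixSetB
                 (PySem.Chars.slice t (some (PySem.Chars.rfind t ['.'])) none)) = true then
        String.mk (PySem.Chars.slice t none (some (PySem.Chars.rfind t ['.'])))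
      else String.mk t) := by
  by_cases hex : ∃ s ∈ pvSuffixListA, PySem.Chars.endswith t s = true
  · -- some suffix matches: t = u ++ '.'::cs
    obtain ⟨s, hsmem, hsend⟩ := hex
    obtain ⟨hhead, hnodot⟩ := pvSuffixShape s hsmem
    obtain ⟨cs, rfl⟩ : ∃ cs, s = '.' :: cs := by
      cases s with
      | nil => simp at hhead
      | cons a as => exact ⟨as, by injection hhead with h; rw [h]⟩
    simp only [List.tail_cons] at hnodot
    obtain ⟨u, hu⟩ := (PySem.Chars.endswith_iff t ('.' :: cs)).mp hsend
    -- rfind t "." = u.length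
    have hrf : PySem.Chars.rfind t ['.'] = (u.length : Int) := by
      have hj : t[u.length]? = some '.' := by
        rw [← hu, List.getElem?_append_right (le_refl u.length)]
        simp
      have hnone : ∀ i, u.length < i → t[i]? ≠ some '.' := by
        intro i hi hsome
        rw [← hu, List.getElem?_append_right (by omega)] at hsome
        have hpos : 0 < i - u.length := by omega
        obtain ⟨p, hp⟩ : ∃ p, i - u.length = p + 1 := ⟨i - u.length - 1, by omega⟩
        rw [hp] at hsome
        simp only [List.getElem?_cons_succ] at hsome
        exact hnodot (List.mem_of_getElem? hsome)
      have hlen : u.length ≤ t.length := by rw [← hu]; simp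
      unfold PySem.Chars.rfind
      exact pvRfindGo_eq t '.' u.length hj hnone t.length hlen
    have hdrop : PySem.Chars.slice t (some (PySem.Chars.rfind t ['.'])) none = '.' :: cs := by
      rw [hrf]
      simp only [PySem.Chars.slice_eq_listSlice, PySem.List.slice_from_natCast]
      rw [← hu, List.drop_left]
    have hcond : (PySem.Chars.rfind t ['.'] != -1
        && PySem.Set.contains pvSuffixSetB
             (PySem.Chars.slice t (some (PySem.Chars.rfind t ['.'])) none)) = true := by
      rw [hdrop, hrf, Bool.and_eq_true]
      exact ⟨by simp only [bne_iff_ne, ne_eq]; omega, (pvSetB_mem _).mpr hsmem⟩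
    rw [if_pos hcond]
    -- A side via loop_match
    have huniq : ∀ s' ∈ pvSuffixListA, PySem.Chars.endswith t s' = true → s' = '.' :: cs := by
      intro s' hs' he'
      have h1 := (PySem.Chars.endswith_iff t s').mp he'
      have h2 := (PySem.Chars.endswith_iff t ('.' :: cs)).mp hsend
      cases List.suffix_or_suffix_of_suffix h1 h2 with
      | inl h => exact pvSuffixUniq s' hs' _ hsmem h
      | inr h => exact (pvSuffixUniq _ hsmem s' hs' h).symm
    rw [pvLoop_match pvSuffixListA t ('.' :: cs) hsmem hsend huniq]
    have hAlen : PySem.Chars.slice t none (some (-(('.' :: cs).length : Int)))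
        = List.take u.length t := by
      simp only [PySem.Chars.slice_eq_listSlice]
      rw [PySem.List.slice_to_neg_natCast t ('.' :: cs).length (by simp)]
      congr 1
      rw [← hu]; simp
    have hBlen : PySem.Chars.slice t none (some (PySem.Chars.rfind t ['.']))
        = List.take u.length t := by
      rw [hrf]
      simp only [PySem.Chars.slice_eq_listSlice, PySem.List.slice_to_natCast]
    rw [hAlen, hBlen]
  · -- no suffix matches
    simp only [not_exists, not_and] at hex
    have hall : ∀ s ∈ pvSuffixListA, PySem.Chars.endswith t s = false := by
      intro s hs
      cases h : PySem.Chars.endswith t s with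
      | false => rfl
      | true => exact absurd h (hex s hs)
    have hcond : (PySem.Chars.rfind t ['.'] != -1
        && PySem.Set.contains pvSuffixSetB
             (PySem.Chars.slice t (some (PySem.Chars.rfind t ['.'])) none)) = false := by
      by_cases hne : PySem.Chars.rfind t ['.'] = -1
      · simp [hne]
      · have hge : (0 : Int) ≤ PySem.Chars.rfind t ['.'] := by
          have := pvRfindGo_ge t ['.'] t.length
          unfold PySem.Chars.rfind at hne ⊢
          omega
        have hsuf : PySem.Chars.slice t (some (PySem.Chars.rfind t ['.'])) none <:+ t := by
          simp only [PySem.Chars.slice_eq_listSlice, PySem.List.slice_from t hge]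
          exact List.drop_suffix _ _
        have hcf : PySem.Set.contains pvSuffixSetB
            (PySem.Chars.slice t (some (PySem.Chars.rfind t ['.'])) none) = false := by
          by_contra h
          have ht : PySem.Set.contains pvSuffixSetB
              (PySem.Chars.slice t (some (PySem.Chars.rfind t ['.'])) none) = true := by
            cases hc : PySem.Set.contains pvSuffixSetB
                (PySem.Chars.slice t (some (PySem.Chars.rfind t ['.'])) none) <;> simp_all
          have hmem := (pvSetB_mem _).mp ht
          have := hall _ hmem
          rw [(PySem.Chars.endswith_iff t _).mpr hsuf] at this
          cases this
        rw [hcf, Bool.and_false]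
    rw [if_neg (by rw [hcond]; exact Bool.false_ne_true), pvLoop_no_match pvSuffixListA t hall]

-- ===== VERDICT (by name: the statement is the Claim_ definition above) =====
theorem normalize_ticker_for_dedup_py_spec : Claim_equal_normalize_ticker_for_dedup_py := by
  intro ticker _
  unfold Spec_normalize_ticker_for_dedup_py
  unfold normalize_ticker_for_dedup_py normalize_ticker_for_dedup_py_alt
  by_cases h : ticker = ""
  · simp [h]
  · simp only [h, if_false]
    exact pvCore (PySem.Chars.strip (PySem.Chars.upper ticker.toList))
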